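-- pv_equiv track=rewrite | github.com/CipherSatoru/autoforwardbot | filters.py | remove_line_by_keyword
-- ===== SOURCE A (Python) =====
-- from typing import List, Dict, Optional
--
-- def remove_line_by_keyword(text: str, keywords: List[str]) -> str:
--     """Remove lines containing specific keywords"""
--     if not text or not keywords:
--         return text
--
--     lines = text.split('\n')
--     filtered_lines = []
--
--     # Normalize keywords to lower case for case-insensitive matching
--     keywords_lower = [kw.lower() for kw in keywords if kw.strip()]
--
--     if not keywords_lower: # Skip if keywords list is empty after stripping
--         return text
--
--     for line in lines:
--         line_lower = line.lower()
--         # Check if any of the keywords are present in the line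
--         if not any(kw in line_lower for kw in keywords_lower):
--             filtered_lines.append(line)
--
--     return '\n'.join(filtered_lines)
-- ===== SOURCE B (Python) =====
-- def remove_line_by_keyword(text, keywords):
--     """Remove lines containing specific keywords (case-insensitive).
--
--     Different strategy: keyword-outer progressive filtering. Each line is
--     lowercased ONCE; then for each (non-blank, lowercased) keyword the list
--     of surviving (line, lowered) pairs is filtered in turn. No early-return
--     guards are needed: with no effective keywords the line list is unchanged
--     and split/join is the identity.
--     """
--     kws = [kw.lower() for kw in keywords if kw.strip()]
--     pairs = [(line, line.lower()) for line in text.split('\n')]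
--     for kw in kws:
--         pairs = [p for p in pairs if kw not in p[1]]
--     return '\n'.join(p[0] for p in pairs)
-- ===== Notes on version B (the rewrite author's own statement) =====
-- stated objective: alternative
-- what changed: Inverted loop nesting: instead of scanning all keywords inside a per-line any(), B lowercases each line once, then filters the surviving (line, lowered) pairs once per keyword, and drops all of A's early-return guards (split/join is the identity when no keyword applies).
import Mathlib
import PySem

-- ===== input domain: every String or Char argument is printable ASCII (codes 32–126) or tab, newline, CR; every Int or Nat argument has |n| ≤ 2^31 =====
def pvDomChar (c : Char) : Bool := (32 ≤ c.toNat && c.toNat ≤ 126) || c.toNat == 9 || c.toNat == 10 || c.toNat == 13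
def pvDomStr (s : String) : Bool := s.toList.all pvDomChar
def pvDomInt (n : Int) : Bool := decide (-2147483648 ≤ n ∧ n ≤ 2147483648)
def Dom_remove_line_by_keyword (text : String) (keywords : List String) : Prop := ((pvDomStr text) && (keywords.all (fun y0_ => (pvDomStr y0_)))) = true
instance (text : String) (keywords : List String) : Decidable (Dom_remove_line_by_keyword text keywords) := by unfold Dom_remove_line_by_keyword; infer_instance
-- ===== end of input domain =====

-- B inverts the loop nesting (per-keyword progressive filtering of once-lowered lines,
-- no early-return guards) instead of A's per-line any()-scan over all keywords; objective: alternative.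

-- shared helper: Python's s.split('\n') — the separator is non-empty, so
-- PySem.Chars.split? always returns `some (splitOn …)`; this is that value (exact).
def pvSplitNL (s : String) : List String :=
  (PySem.Chars.splitOn s.toList ['\n']).map String.ofList

-- ===== PORT A =====
def remove_line_by_keyword (text : String) (keywords : List String) : String :=
  if text = "" ∨ keywords = [] then text
  else
    let lines := pvSplitNL text
    let keywords_lower :=
      (keywords.filter (fun kw => !(PySem.Str.strip kw == ""))).map PySem.Str.lower
    if keywords_lower = [] then text
    else
      let filtered_lines := lines.foldl (fun acc line =>
        if !(keywords_lower.any (fun kw => PySem.Str.isIn kw (PySem.Str.lower line)))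
        then acc ++ [line] else acc) []
      PySem.Str.join "\n" filtered_lines

-- ===== PORT B =====
def remove_line_by_keyword_alt (text : String) (keywords : List String) : String :=
  let kws := (keywords.filter (fun kw => !(PySem.Str.strip kw == ""))).map PySem.Str.lower
  let pairs := (pvSplitNL text).map (fun line => (line, PySem.Str.lower line))
  let final := kws.foldl (fun ps kw => ps.filter (fun p => !(PySem.Str.isIn kw p.2))) pairs
  PySem.Str.join "\n" (final.map Prod.fst)

-- ===== PRECONDITION & SPEC =====
def Spec_remove_line_by_keyword (text : String) (keywords : List String) (out : String) : Prop := out = remove_line_by_keyword_alt text keywords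
instance (text : String) (keywords : List String) (out : String) : Decidable (Spec_remove_line_by_keyword text keywords out) := by unfold Spec_remove_line_by_keyword; infer_instance

-- ===== CLAIM (what is proved, stated in full; the proofs are below) =====
def Claim_equal_remove_line_by_keyword : Prop := ∀ (text : String) (keywords : List String), Dom_remove_line_by_keyword text keywords → Spec_remove_line_by_keyword text keywords (remove_line_by_keyword text keywords)

-- ===== LEMMAS AND PROOFS =====

-- structural reformulation of PySem.Chars.splitOn for the single separator '\n'
def splitCh (c : Char) : List Char → List Char → List (List Char)
  | [], cur => [cur.reverse]
  | d :: rest, cur =>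
      if d == c then cur.reverse :: splitCh c rest [] else splitCh c rest (d :: cur)

lemma splitCh_ne_nil (c : Char) (l cur : List Char) : splitCh c l cur ≠ [] := by
  induction l generalizing cur with
  | nil => simp [splitCh]
  | cons d rest ih =>
      simp only [splitCh]
      split_ifs <;> simp [ih]

lemma go_eq_splitCh (c : Char) (fuel : Nat) (l cur : List Char) (acc : List (List Char))
    (h : l.length < fuel) :
    PySem.Chars.splitOn.go [c] fuel l cur acc = acc.reverse ++ splitCh c l cur := by
  induction fuel generalizing l cur acc with
  | zero => omega
  | succ f ih =>
      cases l with
      | nil => simp [PySem.Chars.splitOn.go, splitCh]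
      | cons d rest =>
          have hlen : rest.length < f := by simpa using Nat.lt_of_succ_lt_succ h
          by_cases hcd : c = d
          · have e1 : PySem.Chars.splitOn.go [c] (f+1) (d::rest) cur acc
                = PySem.Chars.splitOn.go [c] f rest [] (cur.reverse :: acc) := by
              simp [PySem.Chars.splitOn.go, hcd]
            have e2 : splitCh c (d::rest) cur = cur.reverse :: splitCh c rest [] := by
              simp [splitCh, hcd]
            rw [e1, e2, ih _ _ _ hlen]
            simp
          · have e1 : PySem.Chars.splitOn.go [c] (f+1) (d::rest) cur acc
                = PySem.Chars.splitOn.go [c] f rest (d :: cur) acc := by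
              simp [PySem.Chars.splitOn.go, hcd]
            have e2 : splitCh c (d::rest) cur = splitCh c rest (d :: cur) := by
              have hdc : ¬ d = c := fun hh => hcd hh.symm
              simp [splitCh, hdc]
            rw [e1, e2, ih _ _ _ hlen]

lemma splitOn_eq_splitCh (c : Char) (l : List Char) :
    PySem.Chars.splitOn l [c] = splitCh c l [] := by
  unfold PySem.Chars.splitOn
  rw [go_eq_splitCh c _ _ _ _ (by omega)]
  simp

lemma join_splitCh (c : Char) (l cur : List Char) :
    PySem.Chars.join [c] (splitCh c l cur) = cur.reverse ++ l := by
  induction l generalizing cur with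
  | nil => simp [splitCh, PySem.Chars.join_singleton]
  | cons d rest ih =>
      simp only [splitCh]
      by_cases hd : d == c
      · simp only [hd, if_pos]
        obtain ⟨q, rest', hq⟩ : ∃ q rest', splitCh c rest [] = q :: rest' := by
          cases hsp : splitCh c rest [] with
          | nil => exact absurd hsp (splitCh_ne_nil c rest [])
          | cons q rest' => exact ⟨q, rest', rfl⟩
        rw [hq, PySem.Chars.join_cons_cons, ← hq, ih]
        simp at hd
        simp [hd]
      · simp only [hd, if_neg, Bool.false_eq_true, not_false_iff]
        rw [ih]
        simp

lemma join_splitOn_roundtrip (c : Char) (l : List Char) :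
    PySem.Chars.join [c] (PySem.Chars.splitOn l [c]) = l := by
  rw [splitOn_eq_splitCh, join_splitCh]; rfl

lemma join_pvSplitNL (s : String) : PySem.Str.join "\n" (pvSplitNL s) = s := by
  rw [← String.toList_inj, PySem.Str.toList_join]
  have : (pvSplitNL s).map String.toList = PySem.Chars.splitOn s.toList ['\n'] := by
    simp [pvSplitNL, List.map_map, Function.comp_def]
  rw [this]
  exact join_splitOn_roundtrip '\n' s.toList

-- B's keyword-outer fold of filters is one filter by the conjunction of all keyword tests
lemma foldl_filter_eq_filter_all (kws : List String) (ps : List (String × String)) :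
    kws.foldl (fun ps kw => ps.filter (fun p => !(PySem.Str.isIn kw p.2))) ps
      = ps.filter (fun p => kws.all (fun kw => !(PySem.Str.isIn kw p.2))) := by
  induction kws generalizing ps with
  | nil => simp
  | cons k t ih =>
      rw [List.foldl_cons, ih, List.filter_filter]
      refine List.filter_congr (fun p _ => ?_)
      simp [Bool.and_comm]

lemma alt_eq_join_filter (text : String) (keywords : List String) :
    remove_line_by_keyword_alt text keywords
      = PySem.Str.join "\n" ((pvSplitNL text).filter (fun line =>
          ((keywords.filter (fun kw => !(PySem.Str.strip kw == ""))).map PySem.Str.lower).all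
            (fun kw => !(PySem.Str.isIn kw (PySem.Str.lower line))))) := by
  simp only [remove_line_by_keyword_alt]
  rw [foldl_filter_eq_filter_all, List.filter_map, List.map_map]
  simp [Function.comp_def]

-- ===== VERDICT (by name: the statement is the Claim_ definition above) =====
theorem remove_line_by_keyword_spec : Claim_equal_remove_line_by_keyword := by
  intro text keywords _
  unfold Spec_remove_line_by_keyword
  rw [alt_eq_join_filter]
  simp only [remove_line_by_keyword]
  set kws := (keywords.filter (fun kw => !(PySem.Str.strip kw == ""))).map PySem.Str.lower
    with hkws
  set pred := fun line =>
      kws.all (fun kw => !(PySem.Str.isIn kw (PySem.Str.lower line))) with hpred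
  by_cases hk : kws = []
  · -- no effective keywords: A returns text, B's filter keeps every line
    have hfilter : (pvSplitNL text).filter pred = pvSplitNL text :=
      List.filter_eq_self.mpr (fun line _ => by simp [hpred, hk])
    rw [hfilter, join_pvSplitNL]
    split_ifs <;> rfl
  · have hkeyw : keywords ≠ [] := fun hnil => hk (by simp [hkws, hnil])
    by_cases ht : text = ""
    · -- empty text: A returns ""; B joins the filtering of [""], which is "" either way
      rw [if_pos (Or.inl ht)]
      subst ht
      have hsplit : pvSplitNL "" = [""] := by decide
      rw [hsplit]
      cases hp : pred "" with
      | true => rw [List.filter_singleton, hp]; decide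
      | false => rw [List.filter_singleton, hp]; decide
    · -- general case: both sides are the same join-of-filter
      rw [if_neg (by simp [ht, hkeyw]), if_neg hk,
        PySem.List.foldl_append_if_eq_filter]
      congr 1
      refine (List.filter_congr (fun line _ => ?_)).symm
      simp [hpred, List.all_eq_not_any_not]
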